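-- pv_equiv track=rewrite | github.com/Coder-sai2004/leetcode | 4229-trim-trailing-vowels/trim-trailing-vowels.py | trimTrailingVowels
-- ===== SOURCE A (Python) =====
-- def trimTrailingVowels(s: str) -> str:
--     idx=len(s)
--     i=len(s)-1
--     while i>-1:
--         if s[i] in 'aeiou':
--             idx-=1
--             i-=1
--         else: break
--     return s[:idx]
-- ===== SOURCE B (Python) =====
-- def trimTrailingVowels(s: str) -> str:
--     cut = 0
--     for i, c in enumerate(s):
--         if c not in 'aeiou':
--             cut = i + 1
--     return s[:cut]
-- ===== Notes on version B (the rewrite author's own statement) =====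
-- stated objective: alternative
-- what changed: Replaces A's right-to-left while-loop with early break by a single left-to-right pass that records the position after the last non-vowel and slices there.
import Mathlib
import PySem

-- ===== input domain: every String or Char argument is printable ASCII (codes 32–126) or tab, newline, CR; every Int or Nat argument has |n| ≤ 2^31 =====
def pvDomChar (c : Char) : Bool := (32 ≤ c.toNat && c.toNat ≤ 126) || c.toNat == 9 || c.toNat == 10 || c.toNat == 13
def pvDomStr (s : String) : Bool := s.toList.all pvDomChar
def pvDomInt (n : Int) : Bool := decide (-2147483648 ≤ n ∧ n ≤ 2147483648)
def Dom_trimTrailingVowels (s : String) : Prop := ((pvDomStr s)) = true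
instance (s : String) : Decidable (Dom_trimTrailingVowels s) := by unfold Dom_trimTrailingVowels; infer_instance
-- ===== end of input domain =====

-- B replaces A's right-to-left while/break scan by one forward pass tracking the last non-vowel boundary; same cost.

-- ===== PORT A =====
-- `c in 'aeiou'` for the single character s[i]
def pvVowel (c : Char) : Bool := ['a','e','i','o','u'].contains c

-- the while-loop: state (i, idx); pyGetD is exact since the loop only reads 0 ≤ i < len
def pvAGo (cs : List Char) (i idx : Int) : Int :=
  if _h : i > -1 then
    if pvVowel (PySem.List.pyGetD cs i ' ') then pvAGo cs (i - 1) (idx - 1)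
    else idx
  else idx
termination_by (i + 1).toNat
decreasing_by omega

def trimTrailingVowels (s : String) : String :=
  PySem.Str.slice s none (some (pvAGo s.toList (PySem.Str.len s - 1) (PySem.Str.len s)))

-- ===== PORT B =====
def trimTrailingVowels_alt (s : String) : String :=
  let cut := (PySem.List.enumerate s.toList 0).foldl
    (fun cut ic => if pvVowel ic.2 then cut else ic.1 + 1) 0
  PySem.Str.slice s none (some cut)

-- ===== PRECONDITION & SPEC =====
def Spec_trimTrailingVowels (s : String) (out : String) : Prop := out = trimTrailingVowels_alt s
instance (s : String) (out : String) : Decidable (Spec_trimTrailingVowels s out) := by unfold Spec_trimTrailingVowels; infer_instance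

-- ===== CLAIM (what is proved, stated in full; the proofs are below) =====
def Claim_equal_trimTrailingVowels : Prop := ∀ (s : String), Dom_trimTrailingVowels s → Spec_trimTrailingVowels s (trimTrailingVowels s)

-- ===== LEMMAS AND PROOFS =====

-- number of trailing vowels
def pvK (cs : List Char) : Nat := (cs.reverse.takeWhile pvVowel).length

-- A's loop at an index inside a prefix ignores the appended element
lemma pvAGo_append (ds : List Char) (c : Char) (i idx : Int) (h : i < (ds.length : Int)) :
    pvAGo (ds ++ [c]) i idx = pvAGo ds i idx := by
  by_cases hi : i > -1
  · have hget : PySem.List.pyGetD (ds ++ [c]) i ' ' = PySem.List.pyGetD ds i ' ' := by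
      rw [PySem.List.pyGetD_eq_getElem (ds ++ [c]) ' ' (by omega) (by simp; omega),
          PySem.List.pyGetD_eq_getElem ds ' ' (by omega) (by omega)]
      exact List.getElem_append_left (by omega)
    conv_lhs => rw [pvAGo]
    conv_rhs => rw [pvAGo]
    rw [dif_pos hi, dif_pos hi, hget]
    split
    · exact pvAGo_append ds c (i - 1) (idx - 1) (by omega)
    · rfl
  · conv_lhs => rw [pvAGo]
    conv_rhs => rw [pvAGo]
    rw [dif_neg hi, dif_neg hi]
termination_by (i + 1).toNat
decreasing_by omega

-- A's loop started at the right end subtracts exactly the trailing-vowel count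
lemma pvAGo_char (cs : List Char) (idx : Int) :
    pvAGo cs ((cs.length : Int) - 1) idx = idx - (pvK cs : Int) := by
  induction cs using List.reverseRecOn generalizing idx with
  | nil => rw [pvAGo]; simp [pvK]
  | append_singleton ds c ih =>
    have hlen : (((ds ++ [c]).length : Int)) - 1 = (ds.length : Int) := by simp
    rw [hlen]
    conv_lhs => rw [pvAGo]
    rw [dif_pos (by omega)]
    have hget : PySem.List.pyGetD (ds ++ [c]) ((ds.length : Int)) ' ' = c := by
      rw [PySem.List.pyGetD_eq_getElem (ds ++ [c]) ' ' (by omega) (by simp)]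
      simp
    rw [hget]
    by_cases hv : pvVowel c = true
    · rw [if_pos hv, pvAGo_append ds c _ _ (by omega), ih (idx - 1)]
      have hk : pvK (ds ++ [c]) = pvK ds + 1 := by simp [pvK, hv]
      rw [hk]; push_cast; ring
    · rw [if_neg hv]
      have hk : pvK (ds ++ [c]) = 0 := by simp [pvK, hv]
      rw [hk]; simp

-- B's fold computes: cut unchanged if all of cs are vowels, else start + len − trailing-vowel count
lemma pvBGo_char (cs : List Char) (st cut : Int) :
    (PySem.List.enumerate cs st).foldl
      (fun cut ic => if pvVowel ic.2 then cut else ic.1 + 1) cut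
    = if pvK cs = cs.length then cut else st + (cs.length : Int) - (pvK cs : Int) := by
  induction cs using List.reverseRecOn generalizing cut with
  | nil => simp [pvK]
  | append_singleton ds c ih =>
    rw [PySem.List.enumerate_append, List.foldl_append, ih]
    simp only [PySem.List.enumerate, List.foldl_cons, List.foldl_nil]
    by_cases hv : pvVowel c = true
    · have hk : pvK (ds ++ [c]) = pvK ds + 1 := by simp [pvK, hv]
      rw [if_pos hv, hk]
      by_cases he : pvK ds = ds.length
      · rw [if_pos he, if_pos (by simp [he])]
      · rw [if_neg he, if_neg (by simp; omega)]
        simp only [List.length_append, List.length_cons, List.length_nil]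
        push_cast; ring
    · have hk : pvK (ds ++ [c]) = 0 := by simp [pvK, hv]
      rw [if_neg hv, hk, if_neg (by simp)]
      simp only [List.length_append, List.length_cons, List.length_nil]
      push_cast; ring

-- ===== VERDICT (by name: the statement is the Claim_ definition above) =====
theorem trimTrailingVowels_spec : Claim_equal_trimTrailingVowels := by
  intro s _
  unfold Spec_trimTrailingVowels trimTrailingVowels trimTrailingVowels_alt
  have hA : pvAGo s.toList (PySem.Str.len s - 1) (PySem.Str.len s)
      = (s.toList.length : Int) - (pvK s.toList : Int) := by
    rw [PySem.Str.len_eq]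
    exact pvAGo_char s.toList _
  have hB : (PySem.List.enumerate s.toList 0).foldl
      (fun cut ic => if pvVowel ic.2 then cut else ic.1 + 1) 0
      = (s.toList.length : Int) - (pvK s.toList : Int) := by
    rw [pvBGo_char]
    by_cases he : pvK s.toList = s.toList.length
    · rw [if_pos he, he]; simp
    · rw [if_neg he]; ring
  rw [hA]
  simp only [hB]
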